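-- pv_equiv track=rewrite | github.com/WestonHanson/Pluvicto-TFx-Analysis | python_scripts/genome_instability_v1.py | find_T_cycles
-- ===== SOURCE A (Python) =====
-- def find_T_cycles(patient_dict):
--     # Sort dict by key
--     patient_dict = dict(sorted(patient_dict.items()))
--
--     # Sort dict by index 2 of tuple value
--     {k: v for k, v in sorted(patient_dict.items(), key = lambda item: item[1][2])}
--
--     patient_pregression_cycle_dict = {}
--     last_patient = None
--     for item in patient_dict.keys():
--         if last_patient != item:
--             patient_id = item.split("_")[0]
--             patient_pregression_cycle_dict[patient_id] = patient_dict[item][2]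
--         last_patient = item
--
--     return patient_pregression_cycle_dict
-- ===== SOURCE B (Python) =====
-- def find_T_cycles(patient_dict):
--     # One pass: for each patient id keep (smallest key, largest key, cycle value at the largest key),
--     # then sort only the per-patient summaries by their smallest key (A's output order).
--     best = {}
--     for key, value in patient_dict.items():
--         pid = key.split("_")[0]
--         if pid in best:
--             mn, mx, val = best[pid]
--             if mx < key:
--                 mx, val = key, value[2]
--             if key < mn:
--                 mn = key
--             best[pid] = (mn, mx, val)
--         else:
--             best[pid] = (key, key, value[2])
--     return {pid: t[2] for pid, t in sorted(best.items(), key=lambda it: it[1][0])}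
-- ===== Notes on version B (the rewrite author's own statement) =====
-- stated objective: faster
-- what changed: Instead of sorting all n entries and sweeping them with overwrites, B makes one unsorted pass keeping per patient id the smallest key, the largest key and the cycle value at the largest key, then sorts only the m per-patient summaries (m = number of patient ids) to reproduce A's output order.
import Mathlib
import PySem

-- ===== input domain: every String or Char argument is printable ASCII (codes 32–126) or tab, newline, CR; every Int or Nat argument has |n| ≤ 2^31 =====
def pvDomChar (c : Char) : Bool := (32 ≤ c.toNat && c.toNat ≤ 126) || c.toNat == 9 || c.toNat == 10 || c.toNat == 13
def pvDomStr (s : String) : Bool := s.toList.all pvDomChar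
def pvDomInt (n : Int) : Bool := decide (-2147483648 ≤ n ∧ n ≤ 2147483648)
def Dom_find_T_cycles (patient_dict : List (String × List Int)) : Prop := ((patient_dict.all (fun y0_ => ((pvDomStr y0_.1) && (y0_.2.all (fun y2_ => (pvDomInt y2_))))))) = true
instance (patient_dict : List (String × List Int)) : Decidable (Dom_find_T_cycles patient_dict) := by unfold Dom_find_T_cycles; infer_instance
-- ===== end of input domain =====

-- B replaces A's sort-everything-then-sweep by one unsorted pass keeping, per patient id, the
-- smallest key, the largest key and the cycle value at the largest key, sorting only the
-- per-patient summaries at the end (objective: faster).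


-- ===== PORT A =====
-- item.split("_")[0]: split? is none only for sep = "", and the split list is never empty,
-- so neither getD default can fire — exact
def pvPid (s : String) : String := ((PySem.Str.split? s "_").getD []).getD 0 ""

def find_T_cycles (patient_dict : List (String × List Int)) : List (String × Int) :=
  -- patient_dict = dict(sorted(patient_dict.items())): Python orders the (key, value) tuples,
  -- but the keys of a dict are distinct, so tuple order is key order — exact under Pre_
  let d0 := PySem.Dict.ofList (PySem.List.sorted patient_dict (fun p => p.1) false)
  -- A's dict-comprehension line only builds a discarded value; it raises exactly when some
  -- value has fewer than 3 entries, which Pre_ excludes — nothing to compute here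
  let st := d0.keys.foldl
    (fun (st : PySem.Dict String Int × Option String) item =>
      if st.2 ≠ some item then
        (st.1.insert (pvPid item) (PySem.List.pyGetD (d0.getD item []) 2 0), some item)
      else (st.1, some item))
    (PySem.Dict.empty, none)
  st.1.items

-- ===== PORT B =====
def find_T_cycles_alt (patient_dict : List (String × List Int)) : List (String × Int) :=
  let best := patient_dict.foldl
    (fun (b : PySem.Dict String (String × String × Int)) p =>
      b.insert (pvPid p.1)
        (match b.get? (pvPid p.1) with
         | some (mn, mx, val) =>
             let m := if mx < p.1 then (p.1, PySem.List.pyGetD p.2 2 0) else (mx, val)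
             (if p.1 < mn then p.1 else mn, m.1, m.2)
         | none => (p.1, p.1, PySem.List.pyGetD p.2 2 0)))
    PySem.Dict.empty
  (PySem.List.sorted best.items (fun it => it.2.1) false).map (fun p => (p.1, p.2.2.2))

-- ===== PRECONDITION & SPEC =====
-- Pre_ excludes assoc lists with duplicate keys (not a faithful representation of A's dict
-- argument) and entries whose value has fewer than 3 components (value[2] raises IndexError).
def Pre_find_T_cycles (patient_dict : List (String × List Int)) : Prop :=
  (patient_dict.map (·.1)).Nodup ∧ ∀ p ∈ patient_dict, 3 ≤ p.2.length
instance (patient_dict : List (String × List Int)) : Decidable (Pre_find_T_cycles patient_dict) := by unfold Pre_find_T_cycles; infer_instance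
def pvWitness_find_T_cycles : (List (String × List Int)) :=
  [("P1_a", [1, 2, 3]), ("P2", [4, 5, 6]), ("P1_b", [7, 8, 9])]

def Spec_find_T_cycles (patient_dict : List (String × List Int)) (out : List (String × Int)) : Prop := out = find_T_cycles_alt patient_dict
instance (patient_dict : List (String × List Int)) (out : List (String × Int)) : Decidable (Spec_find_T_cycles patient_dict out) := by unfold Spec_find_T_cycles; infer_instance

-- ===== CLAIM (what is proved, stated in full; the proofs are below) =====
def Claim_equal_find_T_cycles : Prop := ∀ (patient_dict : List (String × List Int)), Dom_find_T_cycles patient_dict → Pre_find_T_cycles patient_dict → Spec_find_T_cycles patient_dict (find_T_cycles patient_dict)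

-- ===== LEMMAS AND PROOFS =====

def pvOStep (o : Option (String × String × Int)) (p : String × List Int) :
    Option (String × String × Int) :=
  some (match o with
        | some (mn, mx, val) =>
            let m := if mx < p.1 then (p.1, PySem.List.pyGetD p.2 2 0) else (mx, val)
            (if p.1 < mn then p.1 else mn, m.1, m.2)
        | none => (p.1, p.1, PySem.List.pyGetD p.2 2 0))

def pvGrp (l : List (String × List Int)) (q : String) : List (String × List Int) :=
  l.filter (fun p => pvPid p.1 == q)

-- L1: with pairwise-distinct keys the last_patient test is always true
theorem pv_drop_last (look : String → Int) :
    ∀ (ks : List String) (d : PySem.Dict String Int) (o : Option String),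
      ks.Pairwise (· ≠ ·) → (∀ x, o = some x → x ∉ ks) →
      (ks.foldl (fun st item =>
          if st.2 ≠ some item then (st.1.insert (pvPid item) (look item), some item)
          else (st.1, some item)) (d, o)).1
        = ks.foldl (fun d item => d.insert (pvPid item) (look item)) d := by
  intro ks
  induction ks with
  | nil => intro d o _ _; rfl
  | cons k ks ih =>
    intro d o hp ho
    have hok : o ≠ some k := fun h => ho k h (by simp)
    rw [List.foldl_cons, List.foldl_cons, if_pos hok]
    exact ih _ (some k) hp.of_cons (by
      intro x hx hmem
      exact (List.pairwise_cons.1 hp).1 x hmem (Option.some.inj hx))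

-- L5
theorem pv_ostep_char (G : List (String × List Int)) (hne : G ≠ []) :
    ∃ mn pm, G.foldl pvOStep none = some (mn, pm.1, PySem.List.pyGetD pm.2 2 0) ∧
      pm ∈ G ∧ (∀ p ∈ G, p.1 ≤ pm.1) ∧ (∃ pn ∈ G, pn.1 = mn) ∧ (∀ p ∈ G, mn ≤ p.1) := by
  induction G using List.reverseRecOn with
  | nil => exact absurd rfl hne
  | append_singleton G r ih =>
    rw [List.foldl_append]
    rcases eq_or_ne G [] with rfl | hG
    · exact ⟨r.1, r, rfl, by simp, by simp, ⟨r, by simp⟩, by simp⟩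
    · obtain ⟨mn, pm, hfold, hpm, hmax, ⟨pn, hpn, hpneq⟩, hmin⟩ := ih hG
      rw [hfold]
      have hstep : pvOStep (some (mn, pm.1, PySem.List.pyGetD pm.2 2 0)) r
          = some ((if r.1 < mn then r.1 else mn),
                  (if pm.1 < r.1 then r.1 else pm.1),
                  (if pm.1 < r.1 then PySem.List.pyGetD r.2 2 0 else PySem.List.pyGetD pm.2 2 0)) := by
        simp only [pvOStep]
        by_cases hx : pm.1 < r.1 <;> simp [hx]
      refine ⟨(if r.1 < mn then r.1 else mn), (if pm.1 < r.1 then r else pm), ?_, ?_, ?_, ?_, ?_⟩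
      · rw [List.foldl_cons, List.foldl_nil, hstep]
        by_cases hx : pm.1 < r.1 <;> simp [hx]
      · by_cases hx : pm.1 < r.1
        · rw [if_pos hx]; exact List.mem_append.2 (Or.inr (by simp))
        · rw [if_neg hx]; exact List.mem_append.2 (Or.inl hpm)
      · intro p hp
        rcases List.mem_append.1 hp with h | h
        · by_cases hx : pm.1 < r.1
          · rw [if_pos hx]; exact le_of_lt (lt_of_le_of_lt (hmax p h) hx)
          · rw [if_neg hx]; exact hmax p h
        · simp only [List.mem_singleton] at h; subst h
          by_cases hx : pm.1 < p.1
          · rw [if_pos hx]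
          · rw [if_neg hx]; exact le_of_not_gt hx
      · by_cases hy : r.1 < mn
        · rw [if_pos hy]; exact ⟨r, List.mem_append.2 (Or.inr (by simp)), rfl⟩
        · rw [if_neg hy]; exact ⟨pn, List.mem_append.2 (Or.inl hpn), hpneq⟩
      · intro p hp
        rcases List.mem_append.1 hp with h | h
        · by_cases hy : r.1 < mn
          · rw [if_pos hy]; exact le_of_lt (lt_of_lt_of_le hy (hmin p h))
          · rw [if_neg hy]; exact hmin p h
        · simp only [List.mem_singleton] at h; subst h
          by_cases hy : p.1 < mn
          · rw [if_pos hy]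
          · rw [if_neg hy]; exact le_of_not_gt hy

def pvBF (b : PySem.Dict String (String × String × Int)) (p : String × List Int) :
    String × String × Int :=
  match b.get? (pvPid p.1) with
  | some (mn, mx, val) =>
      let m := if mx < p.1 then (p.1, PySem.List.pyGetD p.2 2 0) else (mx, val)
      (if p.1 < mn then p.1 else mn, m.1, m.2)
  | none => (p.1, p.1, PySem.List.pyGetD p.2 2 0)

def pvBStep (b : PySem.Dict String (String × String × Int)) (p : String × List Int) :
    PySem.Dict String (String × String × Int) :=
  b.insert (pvPid p.1) (pvBF b p)

-- L4: B's fold read at q only sees q's group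
theorem pv_get_fold (l : List (String × List Int)) :
    ∀ (b : PySem.Dict String (String × String × Int)) (q : String),
      (l.foldl pvBStep b).get? q = (pvGrp l q).foldl pvOStep (b.get? q) := by
  induction l with
  | nil => intro b q; rfl
  | cons p l ih =>
    intro b q
    rw [List.foldl_cons]
    show (List.foldl pvBStep (pvBStep b p) l).get? q = _
    rw [ih]
    unfold pvGrp
    rw [List.filter_cons]
    by_cases h : pvPid p.1 = q
    · rw [if_pos (by simp [h]), List.foldl_cons]
      congr 1
      show (b.insert (pvPid p.1) (pvBF b p)).get? q = pvOStep (b.get? q) p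
      rw [h, PySem.Dict.get?_insert_self]
      unfold pvBF pvOStep
      rw [h]
    · rw [if_neg (by simp [h])]
      congr 1
      show (b.insert (pvPid p.1) (pvBF b p)).get? q = b.get? q
      exact PySem.Dict.get?_insert_of_ne (hne := fun hq => h hq.symm) ..

-- members of a strictly key-sorted list are determined by their key
theorem pv_mem_eq_of_pairwise_lt {xs : List (String × List Int)}
    (h : xs.Pairwise (fun a b => a.1 < b.1)) {a b : String × List Int}
    (ha : a ∈ xs) (hb : b ∈ xs) (hk : a.1 = b.1) : a = b := by
  induction xs with
  | nil => cases ha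
  | cons x xs ih =>
    rcases List.mem_cons.1 ha with rfl | ha' <;> rcases List.mem_cons.1 hb with rfl | hb'
    · rfl
    · exact absurd hk (ne_of_lt ((List.pairwise_cons.1 h).1 b hb'))
    · exact absurd hk.symm (ne_of_lt ((List.pairwise_cons.1 h).1 a ha'))
    · exact ih (List.pairwise_cons.1 h).2 ha' hb'

-- L7: the group fold value only depends on the group up to permutation,
-- provided some permutation of it is strictly key-sorted
theorem pv_fold_perm (G G' : List (String × List Int)) (hp : G.Perm G')
    (hs : G'.Pairwise (fun a b => a.1 < b.1)) :
    G.foldl pvOStep none = G'.foldl pvOStep none := by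
  rcases eq_or_ne G [] with rfl | hG
  · rw [hp.nil_eq]
  · have hG' : G' ≠ [] := by
      intro h; subst h; exact hG hp.eq_nil
    obtain ⟨mn, pm, hf, hpm, hmax, ⟨pn, hpn, hpne⟩, hmin⟩ := pv_ostep_char G hG
    obtain ⟨mn', pm', hf', hpm', hmax', ⟨pn', hpn', hpne'⟩, hmin'⟩ := pv_ostep_char G' hG'
    have hmm : mn = mn' := by
      apply le_antisymm
      · exact hpne' ▸ hmin pn' (hp.mem_iff.2 hpn')
      · exact hpne ▸ hmin' pn (hp.mem_iff.1 hpn)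
    have hpmm : pm = pm' := by
      apply pv_mem_eq_of_pairwise_lt hs (hp.mem_iff.1 hpm) hpm'
      exact le_antisymm (hmax' pm (hp.mem_iff.1 hpm)) (hmax pm' (hp.mem_iff.2 hpm'))
    rw [hf, hf', hmm, hpmm]

def pvAIns (d : PySem.Dict String Int) (p : String × List Int) : PySem.Dict String Int :=
  d.insert (pvPid p.1) (PySem.List.pyGetD p.2 2 0)

theorem pv_mem_grp {l : List (String × List Int)} {q : String} {p : String × List Int} :
    p ∈ pvGrp l q ↔ p ∈ l ∧ pvPid p.1 = q := by
  unfold pvGrp; simp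

theorem pv_keys_b (l : List (String × List Int)) :
    (l.foldl pvBStep PySem.Dict.empty).keys = PySem.Set.ofList (l.map (fun p => pvPid p.1)) :=
  PySem.Dict.keys_foldl_insert_key l (fun p => pvPid p.1) pvBF PySem.Dict.empty

theorem pv_keys_a (S : List (String × List Int)) :
    (S.foldl pvAIns PySem.Dict.empty).keys = PySem.Set.ofList (S.map (fun p => pvPid p.1)) :=
  PySem.Dict.keys_foldl_insert_key S (fun p => pvPid p.1)
    (fun _ p => PySem.List.pyGetD p.2 2 0) PySem.Dict.empty

theorem pv_nodup_keys_b (l : List (String × List Int)) :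
    (l.foldl pvBStep PySem.Dict.empty).keys.Nodup :=
  PySem.Dict.nodup_keys_foldl_insert_key l (fun p => pvPid p.1) pvBF PySem.Dict.empty
    PySem.Dict.nodup_keys_empty

-- characterize every stored summary of B's fold
theorem pv_item_char (S : List (String × List Int)) (t : String × String × String × Int)
    (ht : t ∈ (S.foldl pvBStep PySem.Dict.empty).items) :
    ∃ pn pm, pn ∈ pvGrp S t.1 ∧ pm ∈ pvGrp S t.1 ∧ pn.1 = t.2.1 ∧ pm.1 = t.2.2.1 ∧
      t.2.2.2 = PySem.List.pyGetD pm.2 2 0 ∧ (∀ p ∈ pvGrp S t.1, p.1 ≤ pm.1 ∧ t.2.1 ≤ p.1) := by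
  have hget : (S.foldl pvBStep PySem.Dict.empty).get? t.1 = some t.2 :=
    PySem.Dict.get?_of_mem_items _ (by exact ht) (pv_nodup_keys_b S)
  rw [pv_get_fold S PySem.Dict.empty t.1] at hget
  have hg : pvGrp S t.1 ≠ [] := by
    intro h
    rw [h] at hget
    simp [PySem.Dict.get?_empty] at hget
  obtain ⟨mn, pm, hf, hpm, hmax, ⟨pn, hpn, hpne⟩, hmin⟩ := pv_ostep_char (pvGrp S t.1) hg
  have : (PySem.Dict.empty (κ := String) (ν := String × String × Int)).get? t.1 = none := rfl
  rw [this, hf] at hget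
  have ht2 := Option.some.inj hget
  refine ⟨pn, pm, hpn, hpm, ?_, ?_, ?_, fun p hp => ⟨hmax p hp, ?_⟩⟩
  · rw [← ht2]; exact hpne
  · rw [← ht2]
  · rw [← ht2]
  · rw [← ht2]; exact hmin p hp

-- the sorted summaries have strictly increasing min-keys
theorem pv_sorted_strict (S : List (String × List Int))
    (hS : S.Pairwise (fun a b => a.1 < b.1)) :
    (PySem.List.sorted (S.foldl pvBStep PySem.Dict.empty).items
        (fun it => it.2.1) false).Pairwise (fun a b => a.2.1 < b.2.1) := by
  have hne : (S.foldl pvBStep PySem.Dict.empty).items.Pairwise (fun a b => a.1 ≠ b.1) :=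
    List.pairwise_map.1 (pv_nodup_keys_b S)
  have hperm := PySem.List.sorted_perm (S.foldl pvBStep PySem.Dict.empty).items
      (fun it => it.2.1) false
  have hne' := (hperm.pairwise_iff (fun h => Ne.symm h)).2 hne
  have hle := PySem.List.sorted_pairwise (S.foldl pvBStep PySem.Dict.empty).items
      (fun it => it.2.1)
  refine (hle.and hne').imp_of_mem ?_
  intro a b ha hb hab
  refine lt_of_le_of_ne hab.1 ?_
  intro heq
  obtain ⟨pna, _, hpna, _, hka, _⟩ := pv_item_char S a (hperm.mem_iff.1 ha)
  obtain ⟨pnb, _, hpnb, _, hkb, _⟩ := pv_item_char S b (hperm.mem_iff.1 hb)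
  have h1 := pv_mem_grp.1 hpna
  have h2 := pv_mem_grp.1 hpnb
  have : pna = pnb :=
    pv_mem_eq_of_pairwise_lt hS h1.1 h2.1 (by rw [hka, hkb, heq])
  exact hab.2 (by rw [← h1.2, ← h2.2, this])

-- main lemma: on a strictly key-sorted list, A's sweep equals B's rendered summaries
theorem pv_main (S : List (String × List Int))
    (hS : S.Pairwise (fun a b => a.1 < b.1)) :
    (S.foldl pvAIns PySem.Dict.empty).items
      = (PySem.List.sorted (S.foldl pvBStep PySem.Dict.empty).items
          (fun it => it.2.1) false).map (fun p => (p.1, p.2.2.2)) := by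
  induction S using List.reverseRecOn with
  | nil => rfl
  | append_singleton S p ih =>
    obtain ⟨hS1, -, hgt⟩ := List.pairwise_append.1 hS
    have hgt' : ∀ x ∈ S, x.1 < p.1 := fun x hx => hgt x hx p (by simp)
    have ihe := ih hS1
    have hkeq : (S.foldl pvAIns PySem.Dict.empty).keys
        = (S.foldl pvBStep PySem.Dict.empty).keys := by
      rw [pv_keys_a, pv_keys_b]
    rw [List.foldl_append, List.foldl_append, List.foldl_cons, List.foldl_nil,
        List.foldl_cons, List.foldl_nil]
    by_cases hq : (S.foldl pvBStep PySem.Dict.empty).contains (pvPid p.1) = true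
    · -- patient id already present: both sides overwrite its summary value
      have hqa : (S.foldl pvAIns PySem.Dict.empty).contains (pvPid p.1) = true := by
        rw [PySem.Dict.contains_iff_mem_keys, hkeq, ← PySem.Dict.contains_iff_mem_keys]
        exact hq
      obtain ⟨t0, ht0⟩ : ∃ t0, (S.foldl pvBStep PySem.Dict.empty).get? (pvPid p.1) = some t0 := by
        have := PySem.Dict.contains_eq_isSome_get? (S.foldl pvBStep PySem.Dict.empty) (pvPid p.1)
        rw [hq] at this
        exact Option.isSome_iff_exists.1 this.symm
      -- characterize the stored (mn, mx, v): both mn and mx are keys of S, hence < p.1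
      obtain ⟨pn, pm, hpn, hpm, hpn1, hpm1, hval, -⟩ :=
        pv_item_char S (pvPid p.1, t0) (PySem.Dict.mem_items_of_get?_eq_some _ ht0)
      have hmx : t0.2.1 < p.1 := hpm1 ▸ hgt' pm (pv_mem_grp.1 hpm).1
      have hmn : ¬ p.1 < t0.1 := not_lt_of_gt (hpn1 ▸ hgt' pn (pv_mem_grp.1 hpn).1)
      have hbf : pvBF (S.foldl pvBStep PySem.Dict.empty) p
          = (t0.1, p.1, PySem.List.pyGetD p.2 2 0) := by
        unfold pvBF
        rw [ht0]
        simp [hmx, hmn]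
      have hAit := PySem.Dict.items_insert_of_contains (S.foldl pvAIns PySem.Dict.empty)
          (PySem.List.pyGetD p.2 2 0) hqa
      have hBit := PySem.Dict.items_insert_of_contains (S.foldl pvBStep PySem.Dict.empty)
          (t0.1, p.1, PySem.List.pyGetD p.2 2 0) hq
      have hAit2 : (pvAIns (S.foldl pvAIns PySem.Dict.empty) p).items
          = ((S.foldl pvAIns PySem.Dict.empty).insert (pvPid p.1)
              (PySem.List.pyGetD p.2 2 0)).items := rfl
      have hBit2 : (pvBStep (S.foldl pvBStep PySem.Dict.empty) p).items
          = ((S.foldl pvBStep PySem.Dict.empty).insert (pvPid p.1)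
              (t0.1, p.1, PySem.List.pyGetD p.2 2 0)).items := by
        show ((S.foldl pvBStep PySem.Dict.empty).insert (pvPid p.1)
            (pvBF (S.foldl pvBStep PySem.Dict.empty) p)).items = _
        rw [hbf]
      rw [hAit2, hAit, hBit2, hBit]
      have hkeypres : ∀ x ∈ (S.foldl pvBStep PySem.Dict.empty).items,
          ((fun q => if (q.1 == pvPid p.1) = true
              then (pvPid p.1, (t0.1, p.1, PySem.List.pyGetD p.2 2 0)) else q) x).2.1
            = x.2.1 := by
        intro x hx
        by_cases hx1 : x.1 = pvPid p.1
        · have hx2 : x.2 = t0 := by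
            have hg := PySem.Dict.get?_of_mem_items _ hx (pv_nodup_keys_b S)
            rw [hx1, ht0] at hg
            exact (Option.some.inj hg).symm
          have hxmn : x.2.1 = t0.1 := by rw [hx2]
          simp [hx1, hxmn]
        · simp [hx1]
      have hsmap : PySem.List.sorted
            ((S.foldl pvBStep PySem.Dict.empty).items.map
              (fun q => if (q.1 == pvPid p.1) = true
                then (pvPid p.1, (t0.1, p.1, PySem.List.pyGetD p.2 2 0)) else q))
            (fun it => it.2.1) false
          = (PySem.List.sorted (S.foldl pvBStep PySem.Dict.empty).items
              (fun it => it.2.1) false).map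
              (fun q => if (q.1 == pvPid p.1) = true
                then (pvPid p.1, (t0.1, p.1, PySem.List.pyGetD p.2 2 0)) else q) := by
        apply PySem.List.sorted_eq_of_perm_of_pairwise_lt
        · exact (PySem.List.sorted_perm _ _ _).map _
        · refine List.pairwise_map.2 ((pv_sorted_strict S hS1).imp_of_mem ?_)
          intro a b ha hb hab
          have hperm := PySem.List.sorted_perm (S.foldl pvBStep PySem.Dict.empty).items
              (fun it => it.2.1) false
          rw [hkeypres a (hperm.mem_iff.1 ha), hkeypres b (hperm.mem_iff.1 hb)]
          exact hab
      rw [hsmap, ihe, List.map_map, List.map_map]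
      apply List.map_congr_left
      intro x _
      by_cases hx1 : x.1 = pvPid p.1
      · simp [hx1]
      · simp [hx1]
    · -- new patient id: both sides append their new summary at the end
      have hqb : (S.foldl pvBStep PySem.Dict.empty).contains (pvPid p.1) = false :=
        eq_false_of_ne_true hq
      have hqa : (S.foldl pvAIns PySem.Dict.empty).contains (pvPid p.1) = false := by
        apply eq_false_of_ne_true
        intro h
        exact hq (by
          rw [PySem.Dict.contains_iff_mem_keys, ← hkeq, ← PySem.Dict.contains_iff_mem_keys]
          exact h)
      have hnone : (S.foldl pvBStep PySem.Dict.empty).get? (pvPid p.1) = none := by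
        have := PySem.Dict.contains_eq_isSome_get? (S.foldl pvBStep PySem.Dict.empty) (pvPid p.1)
        rw [hqb] at this
        exact Option.not_isSome_iff_eq_none.1 (by rw [← this]; simp)
      have hbf : pvBF (S.foldl pvBStep PySem.Dict.empty) p
          = (p.1, p.1, PySem.List.pyGetD p.2 2 0) := by
        unfold pvBF
        rw [hnone]
      have hAit := PySem.Dict.items_insert_of_not_contains (S.foldl pvAIns PySem.Dict.empty)
          (PySem.List.pyGetD p.2 2 0) hqa
      have hBit := PySem.Dict.items_insert_of_not_contains (S.foldl pvBStep PySem.Dict.empty)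
          (p.1, p.1, PySem.List.pyGetD p.2 2 0) hqb
      have hAit2 : (pvAIns (S.foldl pvAIns PySem.Dict.empty) p).items
          = ((S.foldl pvAIns PySem.Dict.empty).insert (pvPid p.1)
              (PySem.List.pyGetD p.2 2 0)).items := rfl
      have hBit2 : (pvBStep (S.foldl pvBStep PySem.Dict.empty) p).items
          = ((S.foldl pvBStep PySem.Dict.empty).insert (pvPid p.1)
              (p.1, p.1, PySem.List.pyGetD p.2 2 0)).items := by
        show ((S.foldl pvBStep PySem.Dict.empty).insert (pvPid p.1)
            (pvBF (S.foldl pvBStep PySem.Dict.empty) p)).items = _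
        rw [hbf]
      rw [hAit2, hAit, hBit2, hBit]
      have hs : PySem.List.sorted
            ((S.foldl pvBStep PySem.Dict.empty).items
              ++ [(pvPid p.1, (p.1, p.1, PySem.List.pyGetD p.2 2 0))])
            (fun it => it.2.1) false
          = PySem.List.sorted (S.foldl pvBStep PySem.Dict.empty).items
              (fun it => it.2.1) false
            ++ [(pvPid p.1, (p.1, p.1, PySem.List.pyGetD p.2 2 0))] := by
        apply PySem.List.sorted_eq_of_perm_of_pairwise_lt
        · exact List.Perm.append (PySem.List.sorted_perm _ _ _) (List.Perm.refl _)
        · refine List.pairwise_append.2 ⟨pv_sorted_strict S hS1, List.pairwise_singleton _ _, ?_⟩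
          intro a ha b hb
          have hperm := PySem.List.sorted_perm (S.foldl pvBStep PySem.Dict.empty).items
              (fun it => it.2.1) false
          obtain ⟨pn, -, hpn, -, hpn1, -⟩ := pv_item_char S a (hperm.mem_iff.1 ha)
          have hlt : a.2.1 < p.1 := hpn1 ▸ hgt' pn (pv_mem_grp.1 hpn).1
          simp only [List.mem_singleton] at hb
          rw [hb]
          exact hlt
      rw [hs, ihe, List.map_append]
      rfl

-- L2: a dict built from pairs with distinct keys stores exactly those pairs
theorem pv_ofList_items (S : List (String × List Int)) (h : (S.map (·.1)).Nodup) :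
    (PySem.Dict.ofList S).items = S := by
  show (List.foldl (fun acc p => acc.insert p.1 p.2) PySem.Dict.empty S).items = S
  have := PySem.Dict.items_foldl_insert_fresh S Prod.fst Prod.snd PySem.Dict.empty
    (fun a _ => PySem.Dict.contains_empty _) h
  simpa using this

theorem pv_ofList_getD (S : List (String × List Int)) (h : (S.map (·.1)).Nodup)
    {p : String × List Int} (hp : p ∈ S) :
    (PySem.Dict.ofList S).getD p.1 [] = p.2 := by
  apply PySem.Dict.getD_of_mem_items
  · rw [pv_ofList_items S h]; exact hp
  · show ((PySem.Dict.ofList S).items.map (·.1)).Nodup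
    rw [pv_ofList_items S h]; exact h

-- assembly pieces
theorem pv_equal (l : List (String × List Int)) (hnd : (l.map (·.1)).Nodup) :
    (let d0 := PySem.Dict.ofList (PySem.List.sorted l (fun p => p.1) false)
     let st := d0.keys.foldl
       (fun (st : PySem.Dict String Int × Option String) item =>
         if st.2 ≠ some item then
           (st.1.insert (pvPid item) (PySem.List.pyGetD (d0.getD item []) 2 0), some item)
         else (st.1, some item))
       (PySem.Dict.empty, none)
     st.1.items)
    = (PySem.List.sorted
        (l.foldl pvBStep PySem.Dict.empty).items (fun it => it.2.1) false).map
        (fun p => (p.1, p.2.2.2)) := by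
  set S := PySem.List.sorted l (fun p => p.1) false with hSdef
  have hSperm : S.Perm l := PySem.List.sorted_perm l (fun p => p.1) false
  have hknd : (S.map (·.1)).Nodup := ((hSperm.map (·.1)).nodup_iff).2 hnd
  have hstrict : S.Pairwise (fun a b => a.1 < b.1) := by
    have hle : S.Pairwise (fun a b => a.1 ≤ b.1) := PySem.List.sorted_pairwise l (fun p => p.1)
    have hne : S.Pairwise (fun a b => a.1 ≠ b.1) := List.pairwise_map.1 hknd
    exact (hle.and hne).imp (fun h => lt_of_le_of_ne h.1 h.2)
  -- A's sweep over the sorted dict is the plain insert fold over S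
  have hkeys : (PySem.Dict.ofList S).keys = S.map (·.1) := by
    show (PySem.Dict.ofList S).items.map (·.1) = S.map (·.1)
    rw [pv_ofList_items S hknd]
  have hA : (let d0 := PySem.Dict.ofList S
      let st := d0.keys.foldl
        (fun (st : PySem.Dict String Int × Option String) item =>
          if st.2 ≠ some item then
            (st.1.insert (pvPid item) (PySem.List.pyGetD (d0.getD item []) 2 0), some item)
          else (st.1, some item))
        (PySem.Dict.empty, none)
      st.1.items)
      = (S.foldl pvAIns PySem.Dict.empty).items := by
    show ((PySem.Dict.ofList S).keys.foldl _ (PySem.Dict.empty, none)).1.items = _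
    rw [pv_drop_last (fun item => PySem.List.pyGetD ((PySem.Dict.ofList S).getD item []) 2 0)
        (PySem.Dict.ofList S).keys PySem.Dict.empty none
        (by rw [hkeys]; exact hknd)
        (fun x h => absurd h (by simp))]
    rw [hkeys, List.foldl_map]
    congr 1
    apply PySem.List.foldl_congr_mem
    intro acc p hp
    show acc.insert (pvPid p.1) (PySem.List.pyGetD ((PySem.Dict.ofList S).getD p.1 []) 2 0)
      = pvAIns acc p
    rw [pv_ofList_getD S hknd hp]
    rfl
  rw [hA]
  -- bridge: B's fold over l and over S store the same summaries
  have hget : ∀ q, (l.foldl pvBStep PySem.Dict.empty).get? q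
      = (S.foldl pvBStep PySem.Dict.empty).get? q := by
    intro q
    rw [pv_get_fold, pv_get_fold]
    show (pvGrp l q).foldl pvOStep none = (pvGrp S q).foldl pvOStep none
    apply pv_fold_perm
    · exact (hSperm.filter _).symm
    · exact List.Pairwise.sublist List.filter_sublist hstrict
  have hkperm : (l.foldl pvBStep PySem.Dict.empty).keys.Perm
      (S.foldl pvBStep PySem.Dict.empty).keys := by
    rw [pv_keys_b, pv_keys_b]
    refine (List.perm_ext_iff_of_nodup (PySem.Set.nodup_ofList _) (PySem.Set.nodup_ofList _)).2 ?_
    intro a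
    rw [PySem.Set.mem_ofList, PySem.Set.mem_ofList]
    exact ⟨fun h => (hSperm.map _).mem_iff.2 h, fun h => (hSperm.map _).mem_iff.1 h⟩
  have hiperm : (l.foldl pvBStep PySem.Dict.empty).items.Perm
      (S.foldl pvBStep PySem.Dict.empty).items := by
    rw [PySem.Dict.items_eq_map_keys _ (pv_nodup_keys_b l) ("", "", (0 : Int)),
        PySem.Dict.items_eq_map_keys _ (pv_nodup_keys_b S) ("", "", (0 : Int))]
    have hfe : (fun k => (k, (l.foldl pvBStep PySem.Dict.empty).getD k ("", "", (0 : Int))))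
        = (fun k => (k, (S.foldl pvBStep PySem.Dict.empty).getD k ("", "", (0 : Int)))) := by
      funext q
      rw [PySem.Dict.getD_eq_get?_getD, PySem.Dict.getD_eq_get?_getD, hget q]
    rw [hfe]
    exact hkperm.map _
  have hsl : PySem.List.sorted (l.foldl pvBStep PySem.Dict.empty).items
        (fun it => it.2.1) false
      = PySem.List.sorted (S.foldl pvBStep PySem.Dict.empty).items
        (fun it => it.2.1) false := by
    apply PySem.List.sorted_eq_of_perm_of_pairwise_lt
    · exact (PySem.List.sorted_perm _ _ _).trans hiperm.symm
    · exact pv_sorted_strict S hstrict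
  rw [hsl]
  exact pv_main S hstrict

-- ===== VERDICT (by name: the statement is the Claim_ definition above) =====
theorem find_T_cycles_spec : Claim_equal_find_T_cycles := by
  intro patient_dict _ hpre
  show find_T_cycles patient_dict = find_T_cycles_alt patient_dict
  exact pv_equal patient_dict hpre.1
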